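-- pv_equiv track=rewrite | github.com/jmazala/algoexpert | square-of-zeroes/main.py | createZeroMap
-- ===== SOURCE A (Python) =====
-- from typing import Dict, List
--
-- def createZeroMap(matrix) -> List[List[Dict[str, int]]]:
--     zeroMap = []
--
--     for i in reversed(range(len(matrix))):
--         row = []
--
--         for j in reversed(range(len(matrix))):
--             item = {"below": 0, "right": 0}
--             row.insert(0, item)
--
--             if matrix[i][j] == 1:
--                 continue
--
--             item["below"] += 1
--             item["right"] += 1
--
--             if i < len(matrix) - 1:
--                 item["below"] += zeroMap[0][j]["below"]
--
--             if j < len(matrix) - 1: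
--                 item["right"] += row[1]["right"]
--
--         zeroMap.insert(0, row)
--
--     return zeroMap
-- ===== SOURCE B (Python) =====
-- # Two independent directional passes (right-runs per row, below-run carry bottom-up), zipped into the grid.
-- def createZeroMap(matrix):
--     n = len(matrix)
--
--     def runs(cells):
--         out = []
--         acc = 0
--         for c in reversed(cells):
--             acc = 0 if c == 1 else acc + 1
--             out.append(acc)
--         out.reverse()
--         return out
--
--     rights = [runs([row[j] for j in range(n)]) for row in matrix]
--
--     belows_rev = []
--     carry = [0] * n
--     for row in reversed(matrix):
--         carry = [0 if row[j] == 1 else carry[j] + 1 for j in range(n)]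
--         belows_rev.append(carry)
--     belows = belows_rev[::-1]
--
--     return [[{"below": b, "right": r} for b, r in zip(brow, rrow)]
--             for brow, rrow in zip(belows, rights)]
-- ===== Notes on version B (the rewrite author's own statement) =====
-- stated objective: simpler
-- what changed: A builds the grid in one fused bottom-up/right-to-left sweep, inserting each dict at the front of its row and mutating it from the row below; B computes the two fields by two independent directional passes (right-runs per row, a below-run carry over rows bottom-up) and zips them into the grid.
import Mathlib
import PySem

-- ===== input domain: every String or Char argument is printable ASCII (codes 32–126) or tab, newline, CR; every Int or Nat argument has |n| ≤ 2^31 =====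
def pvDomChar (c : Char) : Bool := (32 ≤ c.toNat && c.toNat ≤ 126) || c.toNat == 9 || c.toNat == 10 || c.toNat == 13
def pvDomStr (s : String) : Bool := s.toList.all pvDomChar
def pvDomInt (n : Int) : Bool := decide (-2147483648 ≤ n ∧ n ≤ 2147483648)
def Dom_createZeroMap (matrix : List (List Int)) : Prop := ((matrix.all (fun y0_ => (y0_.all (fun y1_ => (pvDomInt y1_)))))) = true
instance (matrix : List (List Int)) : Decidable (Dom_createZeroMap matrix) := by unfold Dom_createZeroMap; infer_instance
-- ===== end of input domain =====

-- B replaces A's single fused reverse sweep (each row's dicts built by insert-at-front with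
-- in-place increments reading the row below) by two independent directional passes — right-runs
-- per row and below-runs carried bottom-up — zipped into the grid; objective: simpler.

-- ===== PORT A =====
-- d["k"] for the two-key literal dicts A builds (first-match lookup, keys always present)
def pvLookup (d : List (String × Int)) (k : String) : Int := (d.lookup k).getD 0

-- item = {"below": 0, "right": 0}
def pvD0 : List (String × Int) := [("below", 0), ("right", 0)]

-- the body of A's inner loop: the final value of `item` for column j
def pvAItem (matrix : List (List Int)) (n i : Nat)
    (zeroMap : List (List (List (String × Int)))) (row : List (List (String × Int)))
    (j : Nat) : List (String × Int) :=
  if (matrix.getD i []).getD j 0 = 1 then pvD0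
  else
    let b : Int := 1 + (if i < n - 1 then pvLookup ((zeroMap.headD []).getD j pvD0) "below" else 0)
    let r : Int := 1 + (if j < n - 1 then pvLookup (row.headD pvD0) "right" else 0)
    [("below", b), ("right", r)]

-- A's inner loop: for j in reversed(range(n)): row.insert(0, item)
def pvARow (matrix : List (List Int)) (n i : Nat)
    (zeroMap : List (List (List (String × Int)))) : List (List (String × Int)) :=
  (List.range n).reverse.foldl (fun row j => pvAItem matrix n i zeroMap row j :: row) []

-- A's outer loop: for i in reversed(range(n)): zeroMap.insert(0, row)
def createZeroMap (matrix : List (List Int)) : List (List (List (String × Int))) :=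
  (List.range matrix.length).reverse.foldl
    (fun zeroMap i => pvARow matrix matrix.length i zeroMap :: zeroMap) []

-- ===== PORT B =====
-- runs(cells): right-to-left scan, append, final reverse
def pvRuns (cells : List Int) : List Int :=
  ((cells.reverse.foldl (fun (p : List Int × Int) c =>
      let acc : Int := if c = 1 then 0 else p.2 + 1
      (p.1 ++ [acc], acc)) ([], 0)).1).reverse

-- [row[j] for j in range(n)]  (in range under Pre_, where B returns)
def pvIdx (row : List Int) (n : Nat) : List Int :=
  (List.range n).map (fun j => row.getD j 0)

-- carry update: [0 if row[j] == 1 else carry[j] + 1 for j in range(n)]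
def pvStepRow (row carry : List Int) (n : Nat) : List Int :=
  (List.range n).map (fun j => if row.getD j 0 = 1 then 0 else carry.getD j 0 + 1)

def createZeroMap_alt (matrix : List (List Int)) : List (List (List (String × Int))) :=
  let n := matrix.length
  let rights := matrix.map (fun row => pvRuns (pvIdx row n))
  let belows := ((matrix.reverse.foldl (fun (p : List (List Int) × List Int) row =>
      let carry := pvStepRow row p.2 n
      (p.1 ++ [carry], carry)) ([], List.replicate n 0)).1).reverse
  (belows.zip rights).map (fun br =>
    (br.1.zip br.2).map (fun bv => [("below", bv.1), ("right", bv.2)]))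

-- ===== PRECONDITION & SPEC =====
-- Pre_ excludes exactly the inputs on which A raises IndexError: some row shorter than len(matrix).
def Pre_createZeroMap (matrix : List (List Int)) : Prop :=
  ∀ row ∈ matrix, matrix.length ≤ row.length
instance (matrix : List (List Int)) : Decidable (Pre_createZeroMap matrix) := by
  unfold Pre_createZeroMap; infer_instance

def pvWitness_createZeroMap : List (List Int) := [[0, 1], [1, 0]]

def Spec_createZeroMap (matrix : List (List Int)) (out : List (List (List (String × Int)))) : Prop := out = createZeroMap_alt matrix
instance (matrix : List (List Int)) (out : List (List (List (String × Int)))) : Decidable (Spec_createZeroMap matrix out) := by unfold Spec_createZeroMap; infer_instance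

-- ===== CLAIM (what is proved, stated in full; the proofs are below) =====
def Claim_equal_createZeroMap : Prop := ∀ (matrix : List (List Int)), Dom_createZeroMap matrix → Pre_createZeroMap matrix → Spec_createZeroMap matrix (createZeroMap matrix)

-- ===== LEMMAS AND PROOFS =====

-- shared structural spec: right-runs of one row
def rSpec : List Int → List Int
  | [] => []
  | c :: cs => (if c = 1 then 0 else (rSpec cs).headD 0 + 1) :: rSpec cs

-- proof-side zipped form of the carry update
def zipStep (cells carry : List Int) : List Int :=
  (cells.zip carry).map (fun ck => if ck.1 = 1 then 0 else ck.2 + 1)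

-- shared structural spec: below-runs, rows top-to-bottom
def bSpec (n : Nat) : List (List Int) → List (List Int)
  | [] => []
  | row :: rest => zipStep (pvIdx row n) ((bSpec n rest).headD (List.replicate n 0)) :: bSpec n rest

-- shared structural spec: the whole grid
def gSpec (n : Nat) : List (List Int) → List (List (List (String × Int)))
  | [] => []
  | row :: rest =>
      (((zipStep (pvIdx row n) ((bSpec n rest).headD (List.replicate n 0))).zip
          (rSpec (pvIdx row n))).map (fun bv => [("below", bv.1), ("right", bv.2)]))
        :: gSpec n rest

@[simp] theorem pvLookup_below (b r : Int) : pvLookup [("below", b), ("right", r)] "below" = b := rfl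
@[simp] theorem pvLookup_right (b r : Int) : pvLookup [("below", b), ("right", r)] "right" = r := rfl

@[simp] theorem rSpec_length (cells : List Int) : (rSpec cells).length = cells.length := by
  induction cells with
  | nil => rfl
  | cons c cs ih => simp [rSpec, ih]

@[simp] theorem pvIdx_length (row : List Int) (n : Nat) : (pvIdx row n).length = n := by
  simp [pvIdx]

@[simp] theorem zipStep_cons (x y : Int) (xs ys : List Int) :
    zipStep (x :: xs) (y :: ys) = (if x = 1 then 0 else y + 1) :: zipStep xs ys := by
  simp [zipStep]

@[simp] theorem zipStep_length (cells carry : List Int) :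
    (zipStep cells carry).length = min cells.length carry.length := by
  simp [zipStep]

theorem pvStepRow_eq_zipStep (row carry : List Int) (n : Nat) (hc : carry.length = n) :
    pvStepRow row carry n = zipStep (pvIdx row n) carry := by
  apply List.ext_getElem
  · simp [pvStepRow, hc]
  · intro j h1 h2
    have hj : j < n := by simpa [pvStepRow] using h1
    simp [pvStepRow, zipStep, pvIdx, List.getElem_zip,
      List.getElem?_eq_getElem (show j < carry.length by omega)]

@[simp] theorem bSpec_length (n : Nat) (m : List (List Int)) : (bSpec n m).length = m.length := by
  induction m with
  | nil => rfl
  | cons row rest ih => simp [bSpec, ih]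

theorem bSpec_headD_length (n : Nat) (m : List (List Int)) :
    ((bSpec n m).headD (List.replicate n 0)).length = n := by
  cases m with
  | nil => simp [bSpec]
  | cons row rest =>
    have h2 : ((bSpec n rest).headD (List.replicate n 0)).length = n :=
      bSpec_headD_length n rest
    simp only [bSpec, List.headD_cons, zipStep_length, pvIdx_length, h2]
    omega

theorem pvRuns_eq_rSpec (cells : List Int) : pvRuns cells = rSpec cells := by
  have key : ∀ l : List Int,
      (l.reverse.foldl (fun (p : List Int × Int) c =>
        ((p.1 ++ [if c = 1 then 0 else p.2 + 1]), if c = 1 then 0 else p.2 + 1)) ([], 0))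
      = ((rSpec l).reverse, (rSpec l).headD 0) := by
    intro l
    induction l with
    | nil => rfl
    | cons c cs ih =>
      simp only [List.reverse_cons, List.foldl_append, List.foldl_cons, List.foldl_nil, ih, rSpec]
      simp
  simp only [pvRuns, key, List.reverse_reverse]

theorem belows_fold_eq (n : Nat) (m : List (List Int)) :
    (m.reverse.foldl (fun (p : List (List Int) × List Int) row =>
        ((p.1 ++ [pvStepRow row p.2 n]), pvStepRow row p.2 n))
      ([], List.replicate n 0))
    = ((bSpec n m).reverse, (bSpec n m).headD (List.replicate n 0)) := by
  induction m with
  | nil => rfl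
  | cons row rest ih =>
    simp only [List.reverse_cons, List.foldl_append, List.foldl_cons, List.foldl_nil, ih, bSpec]
    rw [pvStepRow_eq_zipStep _ _ _ (bSpec_headD_length n rest)]
    simp

theorem alt_eq_gSpec (matrix : List (List Int)) :
    createZeroMap_alt matrix = gSpec matrix.length matrix := by
  unfold createZeroMap_alt
  simp only [belows_fold_eq, List.reverse_reverse, pvRuns_eq_rSpec]
  generalize matrix.length = n
  induction matrix with
  | nil => rfl
  | cons row rest ih =>
    simp only [bSpec, List.map_cons, List.zip_cons_cons, gSpec]
    exact congrArg _ ih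

-- core inner lemma: A's inner loop from column j0 equals the zipped tail of the spec row
theorem inner_eq (matrix : List (List Int)) (n i : Nat)
    (zm : List (List (List (String × Int)))) (w carry : List Int)
    (hw : w.length = n) (hc : carry.length = n)
    (hcell : ∀ j, j < n → (matrix.getD i []).getD j 0 = w.getD j 0)
    (hβ : ∀ j, j < n →
      (if i < n - 1 then pvLookup ((zm.headD []).getD j pvD0) "below" else 0) = carry.getD j 0) :
    ∀ (b j0 : Nat), j0 + b = n →
      (List.range' j0 b).foldr (fun j acc => pvAItem matrix n i zm acc j :: acc) [] =
      ((zipStep (w.drop j0) (carry.drop j0)).zip (rSpec (w.drop j0))).map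
        (fun bv => [("below", bv.1), ("right", bv.2)]) := by
  intro b
  induction b with
  | zero =>
    intro j0 hj0
    have : w.drop j0 = [] := List.drop_eq_nil_of_le (by omega)
    simp [this, zipStep, rSpec]
  | succ b ih =>
    intro j0 hj0
    have hj0n : j0 < n := by omega
    have hjw : j0 < w.length := by omega
    have hjc : j0 < carry.length := by omega
    have hdw : w.drop j0 = w[j0] :: w.drop (j0 + 1) := List.drop_eq_getElem_cons hjw
    have hdc : carry.drop j0 = carry[j0] :: carry.drop (j0 + 1) := List.drop_eq_getElem_cons hjc
    have hT := ih (j0 + 1) (by omega)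
    have hrange : List.range' j0 (b + 1) = j0 :: List.range' (j0 + 1) b := by
      simp [List.range'_succ]
    rw [hrange]
    simp only [List.foldr_cons, hT]
    rw [hdw, hdc]
    simp only [zipStep_cons, rSpec, List.zip_cons_cons, List.map_cons]
    congr 1
    -- head item
    have hcw : (matrix.getD i []).getD j0 0 = w[j0] := by
      rw [hcell j0 hj0n, List.getD_eq_getElem _ _ hjw]
    by_cases h1 : w[j0] = 1
    · unfold pvAItem
      rw [hcw, if_pos h1]
      simp [h1, pvD0]
    · have hbv : (if i < n - 1 then pvLookup ((zm.headD []).getD j0 pvD0) "below" else 0)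
          = carry[j0] := by rw [hβ j0 hj0n, List.getD_eq_getElem _ _ hjc]
      have hrv : (if j0 < n - 1 then
            pvLookup ((((zipStep (w.drop (j0+1)) (carry.drop (j0+1))).zip
              (rSpec (w.drop (j0+1)))).map
                (fun bv => [("below", bv.1), ("right", bv.2)])).headD pvD0) "right" else 0)
          = (rSpec (w.drop (j0+1))).headD 0 := by
        by_cases hlast : j0 < n - 1
        · have hxs : w.drop (j0+1) ≠ [] := by
            intro hnil; have := congrArg List.length hnil; simp at this; omega
          have hys : carry.drop (j0+1) ≠ [] := by
            intro hnil; have := congrArg List.length hnil; simp at this; omega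
          obtain ⟨x, xs', hx⟩ := List.exists_cons_of_ne_nil hxs
          obtain ⟨y, ys', hy⟩ := List.exists_cons_of_ne_nil hys
          rw [hx, hy]
          simp [zipStep_cons, rSpec, hlast]
        · have : w.drop (j0 + 1) = [] := List.drop_eq_nil_of_le (by omega)
          simp [this, rSpec, hlast]
      unfold pvAItem
      rw [hcw]
      simp only [if_neg h1]
      rw [hbv, hrv]
      simp [Int.add_comm]

-- outer lemma: A's outer loop over indices a..n-1 equals gSpec on the row suffix
theorem outer_eq (matrix : List (List Int)) (hlen : ∀ row ∈ matrix, matrix.length ≤ row.length) :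
    ∀ (rest : List (List Int)) (a : Nat), matrix.drop a = rest →
      (List.range' a rest.length).foldr
        (fun i zm => pvARow matrix matrix.length i zm :: zm) [] = gSpec matrix.length rest := by
  intro rest
  induction rest with
  | nil => intro a _; rfl
  | cons row rest' ih =>
    intro a hdrop
    set n := matrix.length with hn
    have ha : a < n := by
      by_contra h
      have : matrix.drop a = [] := List.drop_eq_nil_of_le (by omega)
      rw [hdrop] at this
      simp at this
    have hcons := List.drop_eq_getElem_cons (l := matrix) (i := a) (by omega)
    rw [hdrop] at hcons
    injection hcons with hrowe hdrope
    have hrow : matrix[a] = row := hrowe.symm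
    have hdrop' : matrix.drop (a + 1) = rest' := hdrope.symm
    have hrest'sub : ∀ r ∈ rest', r ∈ matrix := by
      intro r hr
      exact List.drop_subset (l := matrix) (i := a + 1) (by rw [hdrop']; exact hr)
    have hT := ih (a + 1) hdrop'
    have hrange : List.range' a (row :: rest').length = a :: List.range' (a + 1) rest'.length := by
      simp [List.range'_succ]
    rw [hrange]
    simp only [List.foldr_cons, hT]
    -- head row via inner_eq
    have hrowmem : row ∈ matrix :=
      List.drop_subset (l := matrix) (i := a) (by rw [hdrop]; simp)
    have hrowlen : n ≤ row.length := hlen row hrowmem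
    have hw : (pvIdx row n).length = n := by simp
    set carry := (bSpec n rest').headD (List.replicate n 0) with hcarry
    have hc : carry.length = n := bSpec_headD_length n rest' 
    have hgd : matrix.getD a [] = row := by
      rw [List.getD_eq_getElem _ _ (by omega)]; exact hrow
    have hcell : ∀ j, j < n → (matrix.getD a []).getD j 0 = (pvIdx row n).getD j 0 := by
      intro j hj
      rw [hgd, List.getD_eq_getElem (pvIdx row n) 0 (by rw [hw]; omega)]
      simp [pvIdx]
    have hβ : ∀ j, j < n →
        (if a < n - 1 then pvLookup (((gSpec n rest').headD []).getD j pvD0) "below" else 0)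
          = carry.getD j 0 := by
      intro j hj
      cases rest' with
      | nil =>
        have : ¬ a < n - 1 := by
          have h2 : n ≤ a + 1 := by
            have := congrArg List.length hdrop'
            simp at this
            omega
          omega
        simp only [this, if_false, hcarry, bSpec, List.headD_nil]
        rw [List.getD_eq_getElem _ _ (by simp; omega)]
        simp
      | cons row2 rest'' =>
        have ha2 : a < n - 1 := by
          have hld := congrArg List.length hdrop'
          simp at hld
          omega
        simp only [ha2, if_true]
        have hcarry2len : ((bSpec n rest'').headD (List.replicate n 0)).length = n :=
          bSpec_headD_length n rest''
        have hLlen : (zipStep (pvIdx row2 n) ((bSpec n rest'').headD (List.replicate n 0))).length = n := by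
          rw [zipStep_length, hcarry2len, pvIdx_length]
          omega
        have hRlen : (rSpec (pvIdx row2 n)).length = n := by
          rw [rSpec_length, pvIdx_length]
        simp only [gSpec, List.headD_cons, hcarry, bSpec, List.headD_cons]
        rw [List.getD_eq_getElem _ _ (by rw [List.length_map, List.length_zip, hLlen, hRlen]; omega)]
        rw [List.getD_eq_getElem _ _ (by rw [hLlen]; omega)]
        simp [List.getElem_map, List.getElem_zip]
    have hinner := inner_eq matrix n a (gSpec n rest') (pvIdx row n) carry hw hc hcell hβ n 0 (by omega)
    have hARow : pvARow matrix n a (gSpec n rest') =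
        ((zipStep (pvIdx row n) carry).zip (rSpec (pvIdx row n))).map
          (fun bv => [("below", bv.1), ("right", bv.2)]) := by
      unfold pvARow
      rw [List.foldl_reverse, List.range_eq_range']
      exact hinner
    rw [hARow]
    rfl

-- ===== VERDICT (by name: the statement is the Claim_ definition above) =====
theorem createZeroMap_spec : Claim_equal_createZeroMap := by
  intro matrix _ hpre
  unfold Spec_createZeroMap
  rw [alt_eq_gSpec]
  unfold createZeroMap
  rw [List.foldl_reverse, List.range_eq_range']
  exact outer_eq matrix hpre matrix 0 (by simp)
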